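-- pv_equiv track=rewrite | github.com/rbarden3/fun | grid_sort/graph_alg.py | get_subgrid_ranges
-- ===== SOURCE A (Python) =====
-- from itertools import chain
--
-- def find_node(grid, node):
--     for i, row in enumerate(grid):
--         if node in row:
--             return (i, row.index(node))
--
-- def get_subgrid_ranges(grid, subgrid):
--     grid_nodes = set(chain.from_iterable(grid))
--     subgrid_points = []
--
--     for k in subgrid:
--         if k in grid_nodes:
--             subgrid_points.append(find_node(grid, k))
--     subgrid_points = sorted(subgrid_points)
--     return {"tl": subgrid_points[0], "br": subgrid_points[-1]}
-- ===== SOURCE B (Python) =====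
-- def get_subgrid_ranges(grid, subgrid):
--     need = set(subgrid)
--     points = []
--     for i, row in enumerate(grid):
--         if not need:
--             break
--         if need.isdisjoint(row):
--             continue
--         for j, node in enumerate(row):
--             if node in need:
--                 need.remove(node)
--                 points.append((i, j))
--     points = sorted(points)
--     return {"tl": points[0], "br": points[-1]}
-- ===== Notes on version B (the rewrite author's own statement) =====
-- stated objective: alternative
-- what changed: Replaces A's per-subgrid-node nested grid scan (find_node over the whole grid for every subgrid element) by a single row-major pass that maintains the set of still-needed subgrid nodes, skipping rows disjoint from it and stopping once it is empty, followed by the same sort+index step.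
import Mathlib
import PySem

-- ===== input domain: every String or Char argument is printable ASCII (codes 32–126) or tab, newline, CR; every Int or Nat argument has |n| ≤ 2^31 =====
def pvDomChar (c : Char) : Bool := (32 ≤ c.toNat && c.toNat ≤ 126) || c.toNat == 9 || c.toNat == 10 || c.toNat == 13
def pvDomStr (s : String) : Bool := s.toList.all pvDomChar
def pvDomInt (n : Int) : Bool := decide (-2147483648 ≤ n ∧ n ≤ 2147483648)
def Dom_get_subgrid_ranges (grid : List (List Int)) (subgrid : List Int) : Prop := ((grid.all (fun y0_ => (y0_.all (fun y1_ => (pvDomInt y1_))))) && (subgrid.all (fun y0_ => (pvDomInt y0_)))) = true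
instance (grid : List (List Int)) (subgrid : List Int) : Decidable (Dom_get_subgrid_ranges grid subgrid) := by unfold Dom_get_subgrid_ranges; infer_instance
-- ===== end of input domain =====

-- B replaces A's per-subgrid-node nested grid scan by one row-major pass maintaining the
-- still-needed node set (skipping disjoint rows, stopping when empty), then the same sort+index step.
-- Proved: identical return value on every input where A returns (Pre_); both raise IndexError outside Pre_.


-- ===== PORT A =====
-- find_node: first row containing node, and the node's index in that row; none = Python's implicit None
def findNodeAux (node : Int) (i : Int) : List (List Int) → Option (Int × Int)
  | [] => none
  | row :: rest =>
    if node ∈ row then some (i, (((PySem.List.index? row node).getD 0 : Nat) : Int))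
    else findNodeAux node (i + 1) rest

def find_node (grid : List (List Int)) (node : Int) : Option (Int × Int) :=
  findNodeAux node 0 grid

-- the subgrid_points loop of A ('.getD (0,0)' is unreachable: the guard ensures find_node hits)
def aPoints (grid : List (List Int)) (subgrid : List Int) : List (Int × Int) :=
  let gridNodes : PySem.Set Int := PySem.Set.ofList grid.flatten
  subgrid.foldl
    (fun acc k => if PySem.Set.contains gridNodes k then acc ++ [(find_node grid k).getD (0, 0)] else acc) []

-- sorted(pts)[0] / [-1]; the [] branch is where Python raises IndexError (excluded by Pre_)
def aOut (s : List (Int × Int)) : List (String × Int × Int) :=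
  match s with
  | [] => []
  | m :: t => [("tl", m), ("br", (m :: t).getLast (List.cons_ne_nil m t))]

def get_subgrid_ranges (grid : List (List Int)) (subgrid : List Int) : List (String × Int × Int) :=
  -- Python sorts int pairs lexicographically: key into the Lex order on Int × Int
  aOut (PySem.List.sorted (aPoints grid subgrid) (fun p => toLex p) false)

-- ===== PORT B =====
-- inner loop of B: for j, node in enumerate(row); 'need.remove(node)' is guarded by
-- 'node in need', so it is exactly Set.discard
def altRow (i : Int) : List Int → Int → (PySem.Set Int × List (Int × Int)) → (PySem.Set Int × List (Int × Int))
  | [], _, st => st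
  | node :: rest, j, st =>
    if PySem.Set.contains st.1 node
    then altRow i rest (j + 1) (PySem.Set.discard st.1 node, st.2 ++ [(i, j)])
    else altRow i rest (j + 1) st

-- outer loop of B: for i, row in enumerate(grid), with the 'if not need: break' and
-- 'if need.isdisjoint(row): continue' shortcuts
def altGrid : List (List Int) → Int → (PySem.Set Int × List (Int × Int)) → (PySem.Set Int × List (Int × Int))
  | [], _, st => st
  | row :: rest, i, st =>
    if st.1.isEmpty then st
    else if PySem.Set.isdisjoint st.1 row then altGrid rest (i + 1) st
    else altGrid rest (i + 1) (altRow i row 0 st)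

def bPoints (grid : List (List Int)) (subgrid : List Int) : List (Int × Int) :=
  (altGrid grid 0 (PySem.Set.ofList subgrid, [])).2

-- sorted(points)[0] / [-1]; the [] branch is where Python raises IndexError (excluded by Pre_)
def bOut (s : List (Int × Int)) : List (String × Int × Int) :=
  match s with
  | [] => []
  | m :: t => [("tl", m), ("br", (m :: t).getLast (List.cons_ne_nil m t))]

def get_subgrid_ranges_alt (grid : List (List Int)) (subgrid : List Int) : List (String × Int × Int) :=
  bOut (PySem.List.sorted (bPoints grid subgrid) (fun p => toLex p) false)

-- ===== PRECONDITION & SPEC =====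
-- Pre_ excludes exactly the inputs where no subgrid element occurs in the grid: there both
-- Pythons raise IndexError on points[0].
def Pre_get_subgrid_ranges (grid : List (List Int)) (subgrid : List Int) : Prop :=
  ∃ k ∈ subgrid, k ∈ grid.flatten
instance (grid : List (List Int)) (subgrid : List Int) : Decidable (Pre_get_subgrid_ranges grid subgrid) := by unfold Pre_get_subgrid_ranges; infer_instance

def pvWitness_get_subgrid_ranges : List (List Int) × List Int := ([[1, 2], [3, 4]], [4, 1])

def Spec_get_subgrid_ranges (grid : List (List Int)) (subgrid : List Int) (out : List (String × Int × Int)) : Prop := out = get_subgrid_ranges_alt grid subgrid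
instance (grid : List (List Int)) (subgrid : List Int) (out : List (String × Int × Int)) : Decidable (Spec_get_subgrid_ranges grid subgrid out) := by unfold Spec_get_subgrid_ranges; infer_instance

-- ===== CLAIM (what is proved, stated in full; the proofs are below) =====
def Claim_equal_get_subgrid_ranges : Prop := ∀ (grid : List (List Int)) (subgrid : List Int), Dom_get_subgrid_ranges grid subgrid → Pre_get_subgrid_ranges grid subgrid → Spec_get_subgrid_ranges grid subgrid (get_subgrid_ranges grid subgrid)

-- ===== LEMMAS AND PROOFS =====

theorem findNodeAux_isSome (node : Int) (grid : List (List Int)) :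
    ∀ i : Int, (findNodeAux node i grid).isSome ↔ node ∈ grid.flatten := by
  induction grid with
  | nil => intro i; simp [findNodeAux]
  | cons row rest ih =>
    intro i
    by_cases h : node ∈ row <;> simp [findNodeAux, h, ih]

theorem mem_aPoints (grid : List (List Int)) (subgrid : List Int) (p : Int × Int) :
    p ∈ aPoints grid subgrid ↔ ∃ k ∈ subgrid, find_node grid k = some p := by
  unfold aPoints
  rw [PySem.List.foldl_append_if]
  simp only [List.nil_append, List.mem_map, List.mem_filter]
  constructor
  · rintro ⟨k, ⟨hks, hkg⟩, hval⟩
    have hkf : k ∈ grid.flatten := by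
      simpa [PySem.Set.contains, PySem.Set.mem_ofList] using hkg
    obtain ⟨q, hq⟩ := Option.isSome_iff_exists.mp ((findNodeAux_isSome k grid 0).mpr hkf)
    refine ⟨k, hks, ?_⟩
    rw [show find_node grid k = findNodeAux k 0 grid from rfl, hq]
    rw [show find_node grid k = findNodeAux k 0 grid from rfl, hq] at hval
    simpa using hval
  · rintro ⟨k, hks, hval⟩
    have hkf : k ∈ grid.flatten := by
      rw [← findNodeAux_isSome k grid 0]
      rw [show findNodeAux k 0 grid = find_node grid k from rfl, hval]
      rfl
    refine ⟨k, ⟨hks, ?_⟩, ?_⟩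
    · simpa [PySem.Set.contains, PySem.Set.mem_ofList] using hkf
    · rw [hval]; rfl

theorem altRow_spec (i : Int) (row : List Int) :
    ∀ (j : Int) (need : PySem.Set Int) (pts : List (Int × Int)),
    (∀ x : Int, x ∈ (altRow i row j (need, pts)).1 ↔ x ∈ need ∧ x ∉ row) ∧
    (∀ p : Int × Int, p ∈ (altRow i row j (need, pts)).2 ↔ p ∈ pts ∨
      ∃ k : Int, k ∈ need ∧ ∃ c : Nat, PySem.List.index? row k = some c ∧ p = (i, j + (c : Int))) := by
  induction row with
  | nil => intro j need pts; simp [altRow]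
  | cons node rest ih =>
    intro j need pts
    by_cases hcond : node ∈ need
    · have hb : PySem.Set.contains ((need, pts) : PySem.Set Int × List (Int × Int)).1 node = true := by
        simp [PySem.Set.contains, hcond]
      have hred : altRow i (node :: rest) j (need, pts)
          = altRow i rest (j + 1) (PySem.Set.discard need node, pts ++ [(i, j)]) := by
        rw [altRow, if_pos hb]
      rw [hred]
      obtain ⟨ihs, ihp⟩ := ih (j + 1) (PySem.Set.discard need node) (pts ++ [(i, j)])
      constructor
      · intro x
        rw [ihs x, PySem.Set.mem_discard]
        by_cases hx : x = node
        · subst hx; simp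
        · simp [hx]
      · intro p
        rw [ihp p]
        constructor
        · rintro (hp | ⟨k, hkn, c, hc, rfl⟩)
          · rcases List.mem_append.mp hp with h | h
            · exact Or.inl h
            · simp only [List.mem_singleton] at h
              subst h
              exact Or.inr ⟨node, hcond, 0, PySem.List.index?_cons_self node rest, by simp⟩
          · rw [PySem.Set.mem_discard] at hkn
            refine Or.inr ⟨k, hkn.1, c + 1, ?_, ?_⟩
            · rw [PySem.List.index?_cons_of_ne rest (fun e => hkn.2 e.symm), hc]; rfl
            · simp only [Prod.mk.injEq, true_and]; push_cast; ring
        · rintro (hp | ⟨k, hkn, c, hc, rfl⟩)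
          · exact Or.inl (List.mem_append.mpr (Or.inl hp))
          · by_cases hkn' : k = node
            · subst hkn'
              rw [PySem.List.index?_cons_self] at hc
              obtain rfl : c = 0 := by simpa using hc.symm
              exact Or.inl (List.mem_append.mpr (Or.inr (by simp)))
            · rw [PySem.List.index?_cons_of_ne rest (fun e => hkn' e.symm)] at hc
              obtain ⟨c', hc', rfl⟩ := Option.map_eq_some_iff.mp hc
              refine Or.inr ⟨k, (PySem.Set.mem_discard need node k).mpr ⟨hkn, hkn'⟩, c', hc', ?_⟩
              simp only [Prod.mk.injEq, true_and]; push_cast; ring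
    · have hb : PySem.Set.contains ((need, pts) : PySem.Set Int × List (Int × Int)).1 node = false := by
        simp [PySem.Set.contains, hcond]
      have hred : altRow i (node :: rest) j (need, pts)
          = altRow i rest (j + 1) (need, pts) := by
        rw [altRow, if_neg (by rw [hb]; simp)]
      rw [hred]
      obtain ⟨ihs, ihp⟩ := ih (j + 1) need pts
      constructor
      · intro x
        rw [ihs x]
        by_cases hx : x = node
        · subst hx; simp [hcond]
        · simp [hx]
      · intro p
        rw [ihp p]
        constructor
        · rintro (hp | ⟨k, hkn, c, hc, rfl⟩)
          · exact Or.inl hp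
          · have hkne : node ≠ k := fun e => hcond (e ▸ hkn)
            refine Or.inr ⟨k, hkn, c + 1, ?_, ?_⟩
            · rw [PySem.List.index?_cons_of_ne rest hkne, hc]; rfl
            · simp only [Prod.mk.injEq, true_and]; push_cast; ring
        · rintro (hp | ⟨k, hkn, c, hc, rfl⟩)
          · exact Or.inl hp
          · have hkne : node ≠ k := fun e => hcond (e ▸ hkn)
            rw [PySem.List.index?_cons_of_ne rest hkne] at hc
            obtain ⟨c', hc', rfl⟩ := Option.map_eq_some_iff.mp hc
            refine Or.inr ⟨k, hkn, c', hc', ?_⟩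
            simp only [Prod.mk.injEq, true_and]; push_cast; ring

theorem altGrid_spec (grid : List (List Int)) :
    ∀ (i : Int) (need : PySem.Set Int) (pts : List (Int × Int)),
    ∀ p : Int × Int, p ∈ (altGrid grid i (need, pts)).2 ↔ p ∈ pts ∨
      ∃ k : Int, k ∈ need ∧ findNodeAux k i grid = some p := by
  induction grid with
  | nil => intro i need pts p; simp [altGrid, findNodeAux]
  | cons row rest ih =>
    intro i need pts p
    by_cases hE : need = []
    · subst hE
      have hred : altGrid (row :: rest) i (([] : PySem.Set Int), pts) = (([] : PySem.Set Int), pts) := by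
        rw [altGrid, if_pos (by simp)]
      rw [hred]
      simp
    · by_cases hD : ∀ x ∈ need, x ∉ row
      · have hb : PySem.Set.isdisjoint (((need, pts) : PySem.Set Int × List (Int × Int))).1 row = true :=
          (PySem.Set.isdisjoint_iff need row).mpr hD
        have hred : altGrid (row :: rest) i (need, pts) = altGrid rest (i + 1) (need, pts) := by
          rw [altGrid, if_neg (by simp [List.isEmpty_iff, hE]), if_pos hb]
        rw [hred, ih]
        constructor
        · rintro (hp | ⟨k, hkn, hfk⟩)
          · exact Or.inl hp
          · exact Or.inr ⟨k, hkn, by simpa [findNodeAux, hD k hkn] using hfk⟩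
        · rintro (hp | ⟨k, hkn, hfk⟩)
          · exact Or.inl hp
          · exact Or.inr ⟨k, hkn, by simpa [findNodeAux, hD k hkn] using hfk⟩
      · have hb : PySem.Set.isdisjoint (((need, pts) : PySem.Set Int × List (Int × Int))).1 row = false := by
          cases hq : PySem.Set.isdisjoint need row with
          | true => exact absurd ((PySem.Set.isdisjoint_iff need row).mp hq) hD
          | false => rfl
        have hred : altGrid (row :: rest) i (need, pts)
            = altGrid rest (i + 1) (altRow i row 0 (need, pts)) := by
          rw [altGrid, if_neg (by simp [List.isEmpty_iff, hE]), if_neg (by rw [hb]; simp)]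
        have hpair : altRow i row 0 (need, pts)
            = ((altRow i row 0 (need, pts)).1, (altRow i row 0 (need, pts)).2) := rfl
        rw [hred, hpair, ih]
        obtain ⟨hs, hp⟩ := altRow_spec i row 0 need pts
        constructor
        · rintro (h1 | ⟨k, hkn1, hfk⟩)
          · rcases (hp p).mp h1 with h | ⟨k, hkn, c, hc, rfl⟩
            · exact Or.inl h
            · have hkrow : k ∈ row := (PySem.List.index?_isSome_iff row k).mp (by rw [hc]; rfl)
              refine Or.inr ⟨k, hkn, ?_⟩
              rw [PySem.List.index?_eq_idxOf?] at hc
              simp [findNodeAux, hkrow, hc]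
          · obtain ⟨hkn, hkrow⟩ := (hs k).mp hkn1
            refine Or.inr ⟨k, hkn, ?_⟩
            simpa [findNodeAux, hkrow] using hfk
        · rintro (h1 | ⟨k, hkn, hfk⟩)
          · exact Or.inl ((hp p).mpr (Or.inl h1))
          · by_cases hkrow : k ∈ row
            · obtain ⟨c, hc⟩ := Option.isSome_iff_exists.mp ((PySem.List.index?_isSome_iff row k).mpr hkrow)
              refine Or.inl ((hp p).mpr (Or.inr ⟨k, hkn, c, hc, ?_⟩))
              rw [PySem.List.index?_eq_idxOf?] at hc
              simp [findNodeAux, hkrow, hc] at hfk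
              rw [← hfk]
              simp
            · refine Or.inr ⟨k, (hs k).mpr ⟨hkn, hkrow⟩, by simpa [findNodeAux, hkrow] using hfk⟩

theorem mem_bPoints (grid : List (List Int)) (subgrid : List Int) (p : Int × Int) :
    p ∈ bPoints grid subgrid ↔ ∃ k ∈ subgrid, find_node grid k = some p := by
  unfold bPoints
  rw [altGrid_spec]
  simp [PySem.Set.mem_ofList, find_node]

theorem key_le_getLast {α κ : Type} [LinearOrder κ] (key : α → κ) :
    ∀ (l : List α) (_ : l.Pairwise (fun a b => key a ≤ key b)) (hne : l ≠ []),
    ∀ x ∈ l, key x ≤ key (l.getLast hne) := by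
  intro l
  induction l with
  | nil => intro h hne; exact absurd rfl hne
  | cons a t ih =>
    intro h hne x hx
    cases t with
    | nil =>
      simp only [List.mem_singleton] at hx
      subst hx
      simp [List.getLast]
    | cons b t2 =>
      have hne2 : (b :: t2) ≠ [] := List.cons_ne_nil b t2
      rw [List.getLast_cons hne2]
      rcases List.mem_cons.mp hx with rfl | hx2
      · exact (List.pairwise_cons.mp h).1 _ (List.getLast_mem hne2)
      · exact ih (List.pairwise_cons.mp h).2 hne2 x hx2

-- ===== VERDICT (by name: the statement is the Claim_ definition above) =====
theorem get_subgrid_ranges_spec : Claim_equal_get_subgrid_ranges := by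
  intro grid subgrid _ hpre
  unfold Spec_get_subgrid_ranges
  obtain ⟨k, hks, hkf⟩ := hpre
  obtain ⟨q, hq⟩ := Option.isSome_iff_exists.mp ((findNodeAux_isSome k grid 0).mpr hkf)
  have hqA : q ∈ aPoints grid subgrid := (mem_aPoints _ _ _).mpr ⟨k, hks, hq⟩
  unfold get_subgrid_ranges get_subgrid_ranges_alt
  cases hA : PySem.List.sorted (aPoints grid subgrid) (fun p => toLex p) false with
  | nil =>
    rw [(PySem.List.sorted_eq_nil_iff _ _ _).mp hA] at hqA
    exact absurd hqA List.not_mem_nil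
  | cons m t =>
    cases hB : PySem.List.sorted (bPoints grid subgrid) (fun p => toLex p) false with
    | nil =>
      have hqB : q ∈ bPoints grid subgrid := (mem_bPoints _ _ _).mpr ⟨k, hks, hq⟩
      rw [(PySem.List.sorted_eq_nil_iff _ _ _).mp hB] at hqB
      exact absurd hqB List.not_mem_nil
    | cons m' t' =>
      have memAB : ∀ p : Int × Int, p ∈ aPoints grid subgrid ↔ p ∈ bPoints grid subgrid := by
        intro p; rw [mem_aPoints, mem_bPoints]
      -- the heads agree: both are the lexicographic minimum of the same point set
      have hmA : m ∈ aPoints grid subgrid :=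
        (PySem.List.mem_sorted _ _ _ m).mp (by rw [hA]; exact List.mem_cons_self)
      have hm'B : m' ∈ bPoints grid subgrid :=
        (PySem.List.mem_sorted _ _ _ m').mp (by rw [hB]; exact List.mem_cons_self)
      have h1 := PySem.List.key_head_sorted_le (aPoints grid subgrid) (fun p => toLex p) hA
      have h2 := PySem.List.key_head_sorted_le (bPoints grid subgrid) (fun p => toLex p) hB
      have hm : m = m' := toLex_inj.mp
        (le_antisymm (h1 m' ((memAB m').mpr hm'B)) (h2 m ((memAB m).mp hmA)))
      -- the last elements agree: both are the lexicographic maximum of the same point set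
      have hpwA := PySem.List.sorted_pairwise (aPoints grid subgrid) (fun p => toLex p)
      have hpwB := PySem.List.sorted_pairwise (bPoints grid subgrid) (fun p => toLex p)
      rw [hA] at hpwA
      rw [hB] at hpwB
      have hgAmem : (m :: t).getLast (List.cons_ne_nil m t) ∈ aPoints grid subgrid :=
        (PySem.List.mem_sorted _ _ _ _).mp (by rw [hA]; exact List.getLast_mem _)
      have hgBmem : (m' :: t').getLast (List.cons_ne_nil m' t') ∈ bPoints grid subgrid :=
        (PySem.List.mem_sorted _ _ _ _).mp (by rw [hB]; exact List.getLast_mem _)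
      have hallA := key_le_getLast (fun p : Int × Int => toLex p) (m :: t) hpwA (List.cons_ne_nil m t)
      have hallB := key_le_getLast (fun p : Int × Int => toLex p) (m' :: t') hpwB (List.cons_ne_nil m' t')
      have hgAinB : (m :: t).getLast (List.cons_ne_nil m t) ∈ m' :: t' := by
        rw [← hB]
        exact (PySem.List.mem_sorted _ _ _ _).mpr ((memAB _).mp hgAmem)
      have hgBinA : (m' :: t').getLast (List.cons_ne_nil m' t') ∈ m :: t := by
        rw [← hA]
        exact (PySem.List.mem_sorted _ _ _ _).mpr ((memAB _).mpr hgBmem)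
      have hg : (m :: t).getLast (List.cons_ne_nil m t) = (m' :: t').getLast (List.cons_ne_nil m' t') :=
        toLex_inj.mp (le_antisymm (hallB _ hgAinB) (hallA _ hgBinA))
      simp only [aOut, bOut]
      rw [hg, hm]
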